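-- pv_equiv track=rewrite | github.com/rendanirA/Level-0-coding-challenges | task_0_9.py | find_vowels
-- ===== SOURCE A (Python) =====
-- def find_vowels(string1):
--     results = ""
--     for char in string1:
--         if char in "aeiouAEIOU":
--             results = results + char
--     else:
--         result = ",".join(sorted(set(results), key=results.index))
--     return result
-- ===== SOURCE B (Python) =====
-- def find_vowels(string1):
--     seen = set()
--     out = []
--     for ch in string1:
--         if ch in "aeiouAEIOU" and ch not in seen:
--             seen.add(ch)
--             out.append(ch)
--     return ",".join(out)
-- ===== Notes on version B (the rewrite author's own statement) =====
-- stated objective: simpler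
-- what changed: Replaced A's two-phase accumulate-all-vowels-then-sorted(set(...), key=.index) reconstruction by a single pass that dedupes inline with a seen set and an ordered output list.
import Mathlib
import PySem

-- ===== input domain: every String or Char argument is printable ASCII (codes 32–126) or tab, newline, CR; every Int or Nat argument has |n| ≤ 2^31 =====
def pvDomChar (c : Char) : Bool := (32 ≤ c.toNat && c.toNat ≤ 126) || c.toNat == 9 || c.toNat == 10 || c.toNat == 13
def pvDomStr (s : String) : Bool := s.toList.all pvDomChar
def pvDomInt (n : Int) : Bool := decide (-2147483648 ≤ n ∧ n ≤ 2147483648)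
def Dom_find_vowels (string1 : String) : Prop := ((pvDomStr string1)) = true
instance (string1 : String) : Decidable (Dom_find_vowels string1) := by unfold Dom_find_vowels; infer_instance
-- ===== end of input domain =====

-- B replaces A's accumulate-all-vowels-then-sorted(set(...), key=.index) reconstruction
-- by a single pass that dedupes inline with a seen set and an ordered list (objective: simpler).

-- ===== PORT A =====
def find_vowels (string1 : String) : String :=
  -- results = ""; for char in string1: if char in "aeiouAEIOU": results = results + char
  let results : List Char :=
    string1.toList.foldl
      (fun r c => if ("aeiouAEIOU".toList.contains c) then r ++ [c] else r) []
  -- result = ",".join(sorted(set(results), key=results.index))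
  -- (key = first index in results, injective on set(results), so Python's hash order is irrelevant)
  let srt : List Char :=
    PySem.List.sorted (PySem.Set.ofList results)
      (fun c => (PySem.List.index? results c).getD 0) false
  String.ofList (PySem.Chars.join [','] (srt.map (fun c => [c])))

-- ===== PORT B =====
def find_vowels_alt (string1 : String) : String :=
  -- seen = set(); out = []; for ch: if ch in vowels and ch not in seen: seen.add(ch); out.append(ch)
  let st : PySem.Set Char × List Char :=
    string1.toList.foldl
      (fun p c =>
        if ("aeiouAEIOU".toList.contains c) && !(PySem.Set.contains p.1 c) then
          (PySem.Set.add p.1 c, p.2 ++ [c])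
        else p)
      (PySem.Set.empty, [])
  String.ofList (PySem.Chars.join [','] (st.2.map (fun c => [c])))

-- ===== PRECONDITION & SPEC =====
def Spec_find_vowels (string1 : String) (out : String) : Prop := out = find_vowels_alt string1
instance (string1 : String) (out : String) : Decidable (Spec_find_vowels string1 out) := by unfold Spec_find_vowels; infer_instance

-- ===== CLAIM (what is proved, stated in full; the proofs are below) =====
def Claim_equal_find_vowels : Prop := ∀ (string1 : String), Dom_find_vowels string1 → Spec_find_vowels string1 (find_vowels string1)

-- ===== LEMMAS AND PROOFS =====

theorem pv_idx_cons_ne {c x : Char} (t : List Char) (hne : x ≠ c) (hm : x ∈ t) :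
    (PySem.List.index? (c :: t) x).getD 0 = (PySem.List.index? t x).getD 0 + 1 := by
  rw [PySem.List.index?_cons_of_ne (x := c) (v := x) t (fun h => hne h.symm)]
  obtain ⟨k, hk⟩ := Option.isSome_iff_exists.mp ((PySem.List.index?_isSome_iff t x).mpr hm)
  rw [PySem.List.index?_eq_idxOf?] at hk
  simp [hk]

-- first-occurrence indices are strictly increasing along set(l)'s first-occurrence order
theorem pv_pairwise_idx (l : List Char) :
    (PySem.Set.ofList l).Pairwise
      (fun a b => (PySem.List.index? l a).getD 0 < (PySem.List.index? l b).getD 0) := by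
  induction l with
  | nil => simp [PySem.Set.ofList_nil]
  | cons c t ih =>
    rw [PySem.Set.ofList_cons]
    constructor
    · intro b hb
      have hb' := (PySem.Set.mem_discard _ _ _).mp hb
      have hbt : b ∈ t := (PySem.Set.mem_ofList _ _).mp hb'.1
      rw [PySem.List.index?_cons_self, pv_idx_cons_ne t hb'.2 hbt]
      simp
    · have hsub : List.Sublist (PySem.Set.discard (PySem.Set.ofList t) c) (PySem.Set.ofList t) :=
        List.filter_sublist ..
      refine List.Pairwise.imp_of_mem ?_ (ih.sublist hsub)
      intro a b ha hb h
      have ha' := (PySem.Set.mem_discard _ _ _).mp ha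
      have hb' := (PySem.Set.mem_discard _ _ _).mp hb
      rw [pv_idx_cons_ne t ha'.2 ((PySem.Set.mem_ofList _ _).mp ha'.1),
          pv_idx_cons_ne t hb'.2 ((PySem.Set.mem_ofList _ _).mp hb'.1)]
      omega

-- sorting set(results) by results.index leaves the first-occurrence order unchanged
theorem pv_sorted_ofList_idx (l : List Char) :
    PySem.List.sorted (PySem.Set.ofList l) (fun c => (PySem.List.index? l c).getD 0) false
      = PySem.Set.ofList l := by
  apply PySem.List.sorted_eq_of_perm_of_pairwise_lt
  · exact List.Perm.refl _
  · exact pv_pairwise_idx l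

-- B's paired fold keeps seen = out and equals the single Set.add fold over the vowels
theorem pv_fold_pair (l : List Char) (s : PySem.Set Char) :
    l.foldl
      (fun (p : PySem.Set Char × List Char) c =>
        if ("aeiouAEIOU".toList.contains c) && !(PySem.Set.contains p.1 c) then
          (PySem.Set.add p.1 c, p.2 ++ [c])
        else p) (s, s)
    = (l.foldl (fun s c => if ("aeiouAEIOU".toList.contains c) then PySem.Set.add s c else s) s,
       l.foldl (fun s c => if ("aeiouAEIOU".toList.contains c) then PySem.Set.add s c else s) s) := by
  induction l generalizing s with
  | nil => rfl
  | cons c t ih =>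
    simp only [List.foldl_cons]
    by_cases hv : ("aeiouAEIOU".toList.contains c) = true
    · by_cases hm : c ∈ s
      · have hc : PySem.Set.contains s c = true := (PySem.Set.contains_iff _ _).mpr hm
        rw [show (if ("aeiouAEIOU".toList.contains c) && !(PySem.Set.contains s c) then
              (PySem.Set.add s c, s ++ [c]) else ((s, s) : PySem.Set Char × List Char)) = (s, s) by
            rw [hv, hc]; simp]
        rw [if_pos hv, PySem.Set.add_of_mem hm]
        exact ih s
      · have hc : PySem.Set.contains s c = false := by
          simpa using fun h => hm ((PySem.Set.contains_iff _ _).mp h)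
        rw [show (if ("aeiouAEIOU".toList.contains c) && !(PySem.Set.contains s c) then
              (PySem.Set.add s c, s ++ [c]) else ((s, s) : PySem.Set Char × List Char)) =
              (s ++ [c], s ++ [c]) by rw [hv, hc]; simp [PySem.Set.add_of_not_mem hm]]
        rw [if_pos hv, PySem.Set.add_of_not_mem hm]
        exact ih (s ++ [c])
    · simp only [hv, Bool.false_and]
      simpa using ih s

-- ===== VERDICT (by name: the statement is the Claim_ definition above) =====
theorem find_vowels_spec : Claim_equal_find_vowels := by
  intro s _
  unfold Spec_find_vowels find_vowels find_vowels_alt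
  have hres : s.toList.foldl
      (fun r c => if ("aeiouAEIOU".toList.contains c) then r ++ [c] else r) []
      = s.toList.filter (fun c => "aeiouAEIOU".toList.contains c) := by
    simpa using PySem.List.foldl_append_if_eq_filter
      (fun c => "aeiouAEIOU".toList.contains c) s.toList []
  have hB := pv_fold_pair s.toList PySem.Set.empty
  have hg : s.toList.foldl
      (fun t c => if ("aeiouAEIOU".toList.contains c) then PySem.Set.add t c else t)
      PySem.Set.empty
      = PySem.Set.ofList (s.toList.filter (fun c => "aeiouAEIOU".toList.contains c)) := by
    rw [← List.foldl_filter, PySem.Set.ofList_eq_foldl]; rfl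
  have h2 : (List.foldl
      (fun (p : PySem.Set Char × List Char) c =>
        if ("aeiouAEIOU".toList.contains c) && !(PySem.Set.contains p.1 c) then
          (PySem.Set.add p.1 c, p.2 ++ [c]) else p)
      (PySem.Set.empty, []) s.toList).2
      = PySem.Set.ofList (s.toList.filter (fun c => "aeiouAEIOU".toList.contains c)) :=
    (congrArg Prod.snd hB).trans hg
  simp only [hres, pv_sorted_ofList_idx, h2]
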